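-- pv_equiv track=rewrite | github.com/HasanZia2/Number-Theory-Program | ContinuedFractionCalculator.py | qAlgorithm
-- ===== SOURCE A (Python) =====
-- def qAlgorithm(continued_fraction, index):
--     # This function performs the q calculation for the (p, q)-algorithm.
--
--     if index == 0:
--         q = 1
--     elif index == 1:
--         q = continued_fraction[1]
--     else:
--         return continued_fraction[index]*qAlgorithm(continued_fraction, index - 1) + qAlgorithm(continued_fraction, index - 2)
--     return q
-- ===== SOURCE B (Python) =====
-- def qAlgorithm(continued_fraction, index):
--     # Bottom-up iterative computation of the q-denominator recurrence.
--     if index == 0: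
--         return 1
--     prev, cur = 1, continued_fraction[1]
--     for k in range(2, index + 1):
--         prev, cur = cur, continued_fraction[k] * cur + prev
--     return cur
-- ===== Notes on version B (the rewrite author's own statement) =====
-- stated objective: faster
-- what changed: Replaces the naive double recursion q(n)=a(n)q(n-1)+q(n-2) by a bottom-up loop carrying the last two q values; intended as asymptotically faster (O(n) vs exponential): measured 3.3x at the largest size both finished, A timed out beyond that.
import Mathlib
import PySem

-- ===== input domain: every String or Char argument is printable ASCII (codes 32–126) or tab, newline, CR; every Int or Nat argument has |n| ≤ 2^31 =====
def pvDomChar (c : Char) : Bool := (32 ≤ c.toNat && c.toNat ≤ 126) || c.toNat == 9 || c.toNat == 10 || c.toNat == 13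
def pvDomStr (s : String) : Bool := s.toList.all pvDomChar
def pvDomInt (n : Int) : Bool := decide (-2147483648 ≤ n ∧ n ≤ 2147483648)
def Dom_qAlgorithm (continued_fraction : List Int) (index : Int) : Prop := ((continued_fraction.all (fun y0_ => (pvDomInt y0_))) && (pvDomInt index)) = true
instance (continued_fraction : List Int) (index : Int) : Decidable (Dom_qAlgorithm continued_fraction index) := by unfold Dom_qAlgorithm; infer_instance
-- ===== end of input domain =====

-- B replaces A's double recursion by a bottom-up loop carrying the last two q values; intended as faster (measured 3.3x at the largest size both finished; A timed out beyond that).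

-- ===== PORT A =====
-- Literal port of A's double recursion (index == 0 / == 1 / else branches in order),
-- by structural recursion on the nonnegative index; for index < 0 Python recurses
-- forever (RecursionError), the port returns a junk 0 there (outside Pre_).
def qAlgorithmGo (continued_fraction : List Int) : Nat → Int
  | 0 => 1
  | 1 => (PySem.List.pyGet? continued_fraction 1).getD 0
  | n + 2 => (PySem.List.pyGet? continued_fraction ((n : Int) + 2)).getD 0
               * qAlgorithmGo continued_fraction (n + 1)
             + qAlgorithmGo continued_fraction n

def qAlgorithm (continued_fraction : List Int) (index : Int) : Int :=
  if index < 0 then 0 else qAlgorithmGo continued_fraction index.toNat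

-- ===== PORT B =====
def qAlgorithm_alt (continued_fraction : List Int) (index : Int) : Int :=
  if index = 0 then 1
  else
    ((PySem.List.pyRange 2 (index + 1) 1).foldl
      (fun (pc : Int × Int) k =>
        (pc.2, (PySem.List.pyGet? continued_fraction k).getD 0 * pc.2 + pc.1))
      (1, (PySem.List.pyGet? continued_fraction 1).getD 0)).2

-- ===== PRECONDITION & SPEC =====
-- Pre_ excludes exactly the inputs where Python A does not return: index < 0 (infinite
-- recursion / RecursionError) and out-of-range accesses (IndexError: index = 1 with a list
-- shorter than 2, or index ≥ len(continued_fraction) for index ≥ 2).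
def Pre_qAlgorithm (continued_fraction : List Int) (index : Int) : Prop :=
  index = 0 ∨ (1 ≤ index ∧ index < (continued_fraction.length : Int))
instance (continued_fraction : List Int) (index : Int) : Decidable (Pre_qAlgorithm continued_fraction index) := by unfold Pre_qAlgorithm; infer_instance
def pvWitness_qAlgorithm : List Int × Int := ([2, 3, 4, 5], 3)

def Spec_qAlgorithm (continued_fraction : List Int) (index : Int) (out : Int) : Prop := out = qAlgorithm_alt continued_fraction index
instance (continued_fraction : List Int) (index : Int) (out : Int) : Decidable (Spec_qAlgorithm continued_fraction index out) := by unfold Spec_qAlgorithm; infer_instance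

-- ===== CLAIM (what is proved, stated in full; the proofs are below) =====
def Claim_equal_qAlgorithm : Prop := ∀ (continued_fraction : List Int) (index : Int), Dom_qAlgorithm continued_fraction index → Pre_qAlgorithm continued_fraction index → Spec_qAlgorithm continued_fraction index (qAlgorithm continued_fraction index)

-- ===== LEMMAS AND PROOFS =====

-- Loop invariant: after processing range(2, n+2) the pair holds (q(n), q(n+1)).
theorem loop_inv (cf : List Int) (n : Nat) :
    (PySem.List.pyRange 2 ((n : Int) + 2) 1).foldl
      (fun (pc : Int × Int) k =>
        (pc.2, (PySem.List.pyGet? cf k).getD 0 * pc.2 + pc.1))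
      (1, (PySem.List.pyGet? cf 1).getD 0)
      = (qAlgorithmGo cf n, qAlgorithmGo cf (n + 1)) := by
  induction n with
  | zero =>
      rw [PySem.List.pyRange_one_eq_nil (by norm_num)]
      simp [qAlgorithmGo]
  | succ m ih =>
      have hsplit : PySem.List.pyRange 2 ((↑(m + 1) : Int) + 2) 1
          = PySem.List.pyRange 2 ((m : Int) + 2) 1 ++ [(m : Int) + 2] := by
        have h : ((↑(m + 1) : Int) + 2) = ((m : Int) + 2) + 1 := by push_cast; ring
        rw [h, PySem.List.pyRange_one_succ_right (by omega)]
      rw [hsplit, List.foldl_append, ih]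
      simp only [List.foldl_cons, List.foldl_nil]
      rw [show qAlgorithmGo cf (m + 1 + 1)
            = (PySem.List.pyGet? cf ((m : Int) + 2)).getD 0 * qAlgorithmGo cf (m + 1)
              + qAlgorithmGo cf m from rfl]

theorem alt_eq (cf : List Int) (n : Nat) :
    qAlgorithm_alt cf ((n : Int) + 1) = qAlgorithmGo cf (n + 1) := by
  rw [qAlgorithm_alt]
  have h0 : ¬((n : Int) + 1 = 0) := by omega
  rw [if_neg h0, show (n : Int) + 1 + 1 = (n : Int) + 2 by ring, loop_inv]

-- ===== VERDICT (by name: the statement is the Claim_ definition above) =====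
theorem qAlgorithm_spec : Claim_equal_qAlgorithm := by
  intro cf index _ hpre
  unfold Spec_qAlgorithm
  rcases hpre with h0 | ⟨h1, _⟩
  · subst h0; simp [qAlgorithm, qAlgorithm_alt, qAlgorithmGo]
  · obtain ⟨n, rfl⟩ : ∃ n : Nat, index = (n : Int) + 1 :=
      ⟨(index - 1).toNat, by omega⟩
    rw [alt_eq, qAlgorithm, if_neg (by omega : ¬((n : Int) + 1 < 0)),
        show ((n : Int) + 1).toNat = n + 1 by omega]
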